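-- pv_equiv track=rewrite | github.com/dankimjw/PrepSense | backend_gateway/services/openai_recipe_service_enhanced.py | _determine_seasonality
-- ===== SOURCE A (Python) =====
-- from typing import List, Dict, Any, Optional, Tuple
--
-- def _determine_seasonality(recipe: Dict[str, Any]) -> str:
--     """Determine seasonal appropriateness of recipe"""
--
--     # Simple heuristic based on ingredients
--     ingredients_str = ' '.join([
--         ing.get('name', '') for ing in recipe.get('extendedIngredients', [])
--     ]).lower()
--
--     summer_keywords = ['tomato', 'basil', 'corn', 'zucchini', 'berries']
--     winter_keywords = ['squash', 'potato', 'root', 'hearty', 'stew']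
--
--     summer_count = sum(1 for k in summer_keywords if k in ingredients_str)
--     winter_count = sum(1 for k in winter_keywords if k in ingredients_str)
--
--     if summer_count > winter_count:
--         return "Best in summer"
--     elif winter_count > summer_count:
--         return "Perfect for winter"
--     else:
--         return "Year-round favorite"
-- ===== SOURCE B (Python) =====
-- def _determine_seasonality(recipe):
--     """Determine seasonal appropriateness of recipe"""
--     summer_keywords = ['tomato', 'basil', 'corn', 'zucchini', 'berries']
--     winter_keywords = ['squash', 'potato', 'root', 'hearty', 'stew']
--
--     summer_hits = set()
--     winter_hits = set()
--     for ing in recipe.get('extendedIngredients', []):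
--         name = ing.get('name', '').lower()
--         for k in summer_keywords:
--             if k in name:
--                 summer_hits.add(k)
--         for k in winter_keywords:
--             if k in name:
--                 winter_hits.add(k)
--
--     if len(summer_hits) > len(winter_hits):
--         return "Best in summer"
--     elif len(winter_hits) > len(summer_hits):
--         return "Perfect for winter"
--     else:
--         return "Year-round favorite"
-- ===== Notes on version B (the rewrite author's own statement) =====
-- stated objective: alternative
-- what changed: Single pass over the ingredients maintaining two matched-keyword sets (no joined string is built and no keyword re-scans the whole ingredient text); correct because no keyword contains a space, so a keyword occurs in the space-joined lowered text iff it occurs in some individual lowered name.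
import Mathlib
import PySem

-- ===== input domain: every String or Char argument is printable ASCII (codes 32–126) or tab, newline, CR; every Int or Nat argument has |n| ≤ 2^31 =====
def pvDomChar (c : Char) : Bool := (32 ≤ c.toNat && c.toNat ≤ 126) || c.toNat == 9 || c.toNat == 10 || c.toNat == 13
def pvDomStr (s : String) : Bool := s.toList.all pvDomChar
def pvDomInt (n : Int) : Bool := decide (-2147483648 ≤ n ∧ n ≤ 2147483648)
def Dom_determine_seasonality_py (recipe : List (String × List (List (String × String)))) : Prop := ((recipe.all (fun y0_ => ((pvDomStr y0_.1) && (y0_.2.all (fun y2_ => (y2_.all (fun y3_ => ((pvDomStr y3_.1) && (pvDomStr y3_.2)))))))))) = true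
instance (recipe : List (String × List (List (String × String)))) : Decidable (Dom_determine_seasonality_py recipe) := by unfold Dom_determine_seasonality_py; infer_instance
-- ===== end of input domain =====

-- B replaces "search each keyword in the space-joined lowered ingredient text" by a single pass
-- over the ingredients maintaining two matched-keyword sets (alternative decomposition, same cost).


-- ===== PORT A =====
def determine_seasonality_py (recipe : List (String × List (List (String × String)))) : String :=
  let ingredients := (PySem.Dict.mk recipe).getD "extendedIngredients" []
  let ingredients_str := PySem.Str.lower (PySem.Str.join " "
    (ingredients.map (fun ing => (PySem.Dict.mk ing).getD "name" "")))
  let summer_keywords : List String := ["tomato", "basil", "corn", "zucchini", "berries"]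
  let winter_keywords : List String := ["squash", "potato", "root", "hearty", "stew"]
  let summer_count : Int :=
    ((summer_keywords.filter (fun k => PySem.Str.isIn k ingredients_str)).map (fun _ => (1 : Int))).sum
  let winter_count : Int :=
    ((winter_keywords.filter (fun k => PySem.Str.isIn k ingredients_str)).map (fun _ => (1 : Int))).sum
  if summer_count > winter_count then "Best in summer"
  else if winter_count > summer_count then "Perfect for winter"
  else "Year-round favorite"

-- ===== PORT B =====
def determine_seasonality_py_alt (recipe : List (String × List (List (String × String)))) : String :=
  let summer_keywords : List String := ["tomato", "basil", "corn", "zucchini", "berries"]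
  let winter_keywords : List String := ["squash", "potato", "root", "hearty", "stew"]
  let hits := ((PySem.Dict.mk recipe).getD "extendedIngredients" []).foldl
    (fun (p : PySem.Set String × PySem.Set String) ing =>
      let name := PySem.Str.lower ((PySem.Dict.mk ing).getD "name" "")
      (summer_keywords.foldl (fun s k => if PySem.Str.isIn k name then s.add k else s) p.1,
       winter_keywords.foldl (fun s k => if PySem.Str.isIn k name then s.add k else s) p.2))
    (PySem.Set.empty, PySem.Set.empty)
  if PySem.Set.len hits.1 > PySem.Set.len hits.2 then "Best in summer"
  else if PySem.Set.len hits.2 > PySem.Set.len hits.1 then "Perfect for winter"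
  else "Year-round favorite"

-- ===== PRECONDITION & SPEC =====
def Spec_determine_seasonality_py (recipe : List (String × List (List (String × String)))) (out : String) : Prop := out = determine_seasonality_py_alt recipe
instance (recipe : List (String × List (List (String × String)))) (out : String) : Decidable (Spec_determine_seasonality_py recipe out) := by unfold Spec_determine_seasonality_py; infer_instance

-- ===== CLAIM (what is proved, stated in full; the proofs are below) =====
def Claim_equal_determine_seasonality_py : Prop := ∀ (recipe : List (String × List (List (String × String)))), Dom_determine_seasonality_py recipe → Spec_determine_seasonality_py recipe (determine_seasonality_py recipe)

-- ===== LEMMAS AND PROOFS =====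

-- a space-free pattern is a prefix of `a ++ ' ' :: t` iff it is a prefix of `a`
theorem pv_prefix_no_space (sub : List Char) (h : (' ' : Char) ∉ sub) :
    ∀ (a t : List Char), (sub <+: a ++ ' ' :: t ↔ sub <+: a) := by
  induction sub with
  | nil => intro a t; simp
  | cons c cs ih =>
    intro a t
    cases a with
    | nil =>
      simp only [List.nil_append]
      constructor
      · intro hp
        rcases List.cons_prefix_cons.mp hp with ⟨rfl, -⟩
        exact absurd List.mem_cons_self h
      · intro hp
        exact absurd (List.prefix_nil.mp hp) (List.cons_ne_nil c cs)
    | cons b bs =>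
      simp only [List.cons_append, List.cons_prefix_cons]
      exact and_congr_right (fun _ => ih (fun hm => h (List.mem_cons_of_mem _ hm)) bs t)

-- a nonempty space-free pattern occurs in `p ++ ' ' :: t` iff it occurs in `p` or in `t`
theorem pv_isIn_split (sub p t : List Char) (hne : sub ≠ []) (h : (' ' : Char) ∉ sub) :
    PySem.Chars.isIn sub (p ++ ' ' :: t) = (PySem.Chars.isIn sub p || PySem.Chars.isIn sub t) := by
  rw [Bool.eq_iff_iff, Bool.or_eq_true,
    ← PySem.Chars.exists_prefix_drop_iff_isIn, ← PySem.Chars.exists_prefix_drop_iff_isIn,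
    ← PySem.Chars.exists_prefix_drop_iff_isIn]
  constructor
  · rintro ⟨j, hj⟩
    by_cases hle : j ≤ p.length
    · rw [List.drop_append_of_le_length hle] at hj
      exact Or.inl ⟨j, (pv_prefix_no_space sub h _ t).mp hj⟩
    · obtain ⟨j', rfl⟩ : ∃ j', j = p.length + (j' + 1) := ⟨j - p.length - 1, by omega⟩
      rw [List.drop_length_add_append, List.drop_succ_cons] at hj
      exact Or.inr ⟨j', hj⟩
  · rintro (⟨j, hj⟩ | ⟨j, hj⟩)
    · by_cases hle : j ≤ p.length
      · exact ⟨j, by rw [List.drop_append_of_le_length hle]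
                     exact (pv_prefix_no_space sub h _ t).mpr hj⟩
      · rw [List.drop_of_length_le (by omega)] at hj
        exact absurd (List.prefix_nil.mp hj) hne
    · refine ⟨p.length + (j + 1), ?_⟩
      rw [List.drop_length_add_append, List.drop_succ_cons]
      exact hj

-- occurrence in a space-join is occurrence in some part
theorem pv_isIn_join (sub : List Char) (hne : sub ≠ []) (h : (' ' : Char) ∉ sub) :
    ∀ (ps : List (List Char)),
      PySem.Chars.isIn sub (PySem.Chars.join [' '] ps) = ps.any (fun p => PySem.Chars.isIn sub p)
  | [] => by
    rw [PySem.Chars.join_nil, List.any_nil, Bool.eq_false_iff]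
    intro hc
    exact hne (List.sublist_nil.mp ((PySem.Chars.isIn_iff_infix sub []).mp hc).sublist)
  | [p] => by rw [PySem.Chars.join_singleton, List.any_cons, List.any_nil, Bool.or_false]
  | p :: q :: rest => by
    rw [PySem.Chars.join_cons_cons, List.append_assoc, List.singleton_append,
      pv_isIn_split sub p _ hne h, pv_isIn_join sub hne h (q :: rest)]
    simp [List.any_cons]

-- lowering commutes with the space-join
theorem pv_lower_join : ∀ (ps : List (List Char)),
    PySem.Chars.lower (PySem.Chars.join [' '] ps) = PySem.Chars.join [' '] (ps.map PySem.Chars.lower)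
  | [] => by rw [PySem.Chars.join_nil, List.map_nil, PySem.Chars.join_nil]; rfl
  | [p] => by rw [PySem.Chars.join_singleton, List.map_cons, List.map_nil, PySem.Chars.join_singleton]
  | p :: q :: rest => by
    have ih := pv_lower_join (q :: rest)
    rw [List.map_cons] at ih
    rw [PySem.Chars.join_cons_cons, List.map_cons, List.map_cons, PySem.Chars.join_cons_cons,
      ← ih]
    simp [PySem.Chars.lower, show PySem.Chars.lowerChar ' ' = ' ' from by decide]

-- a space-free nonempty keyword occurs in the lowered joined text iff in some lowered name
theorem pv_keyword_in_text (k : String) (hne : k.toList ≠ []) (h : (' ' : Char) ∉ k.toList)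
    (names : List String) :
    PySem.Str.isIn k (PySem.Str.lower (PySem.Str.join " " names)) =
      names.any (fun n => PySem.Str.isIn k (PySem.Str.lower n)) := by
  rw [PySem.Str.isIn_eq, PySem.Str.toList_lower, PySem.Str.toList_join,
    show (" " : String).toList = [' '] from rfl, pv_lower_join, List.map_map,
    pv_isIn_join k.toList hne h, List.any_map]
  congr 1
  funext n
  simp only [Function.comp_apply, PySem.Str.isIn_eq, PySem.Str.toList_lower]

-- conditional keyword fold = set update with the filtered keyword list
theorem pv_condFold_eq_update (nm : String) (kws : List String) :
    ∀ (s : PySem.Set String),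
      kws.foldl (fun s k => if PySem.Str.isIn k nm then s.add k else s) s =
        PySem.Set.update s (kws.filter (fun k => PySem.Str.isIn k nm)) := by
  induction kws with
  | nil => intro s; rfl
  | cons k kt ih =>
    intro s
    rw [List.foldl_cons, List.filter_cons]
    by_cases hc : PySem.Str.isIn k nm
    · rw [if_pos hc, ih (s.add k), if_pos hc]; rfl
    · rw [if_neg hc, ih s, if_neg hc]

-- fold of updates: membership
theorem pv_fold_mem {α : Type} (kws : List String) (c : α → String → Bool) (l : List α) :
    ∀ (s : PySem.Set String) (x : String),
      x ∈ l.foldl (fun s ing => PySem.Set.update s (kws.filter (c ing))) s ↔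
        x ∈ s ∨ (x ∈ kws ∧ l.any (fun ing => c ing x) = true) := by
  induction l with
  | nil => intro s x; simp
  | cons a l ih =>
    intro s x
    rw [List.foldl_cons, ih, PySem.Set.mem_update, List.mem_filter, List.any_cons, Bool.or_eq_true]
    tauto

-- fold of updates: nodup
theorem pv_fold_nodup {α : Type} (kws : List String) (c : α → String → Bool) (l : List α) :
    ∀ (s : PySem.Set String), s.Nodup →
      (l.foldl (fun s ing => PySem.Set.update s (kws.filter (c ing))) s).Nodup := by
  induction l with
  | nil => intro s hs; exact hs
  | cons a l ih => intro s hs; exact ih _ (PySem.Set.nodup_update _ _ hs)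

-- fold of updates starting from the empty set: its size is the number of matched keywords
theorem pv_fold_length {α : Type} (kws : List String) (hk : kws.Nodup) (c : α → String → Bool)
    (l : List α) :
    (l.foldl (fun s ing => PySem.Set.update s (kws.filter (c ing))) ([] : PySem.Set String)).length
      = (kws.filter (fun k => l.any (fun ing => c ing k))).length := by
  refine List.Perm.length_eq ?_
  rw [List.perm_ext_iff_of_nodup (pv_fold_nodup kws c l [] List.nodup_nil) (hk.filter _)]
  intro x
  rw [pv_fold_mem, List.mem_filter]
  simp

-- the pair fold of B splits into two independent set folds
theorem pv_foldl_pair {α β γ : Type} (f : β → α → β) (g : γ → α → γ) (l : List α) :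
    ∀ (p : β × γ), l.foldl (fun p a => (f p.1 a, g p.2 a)) p = (l.foldl f p.1, l.foldl g p.2) := by
  induction l with
  | nil => intro p; rfl
  | cons a l ih => intro p; rw [List.foldl_cons, ih]; rfl

theorem pv_sum_ones {α : Type} (l : List α) : (l.map (fun _ => (1 : Int))).sum = (l.length : Int) := by
  induction l with
  | nil => rfl
  | cons a l ih => rw [List.map_cons, List.sum_cons, ih, List.length_cons]; push_cast; ring

-- the two counts agree for a keyword list whose members are distinct, nonempty and space-free
theorem pv_count_eq (kws : List String) (hk : kws.Nodup)
    (hcond : ∀ k ∈ kws, k.toList ≠ [] ∧ (' ' : Char) ∉ k.toList)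
    (ingredients : List (List (String × String))) :
    ((kws.filter (fun k => PySem.Str.isIn k (PySem.Str.lower (PySem.Str.join " "
        (ingredients.map (fun ing => (PySem.Dict.mk ing).getD "name" "")))))).map
        (fun _ => (1 : Int))).sum
      = PySem.Set.len (ingredients.foldl (fun s ing =>
          kws.foldl (fun s k =>
            if PySem.Str.isIn k (PySem.Str.lower ((PySem.Dict.mk ing).getD "name" "")) then s.add k
            else s) s) PySem.Set.empty) := by
  have hempty : (PySem.Set.empty : PySem.Set String) = [] := rfl
  have hstep : (fun (s : PySem.Set String) (ing : List (String × String)) =>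
        kws.foldl (fun s k =>
          if PySem.Str.isIn k (PySem.Str.lower ((PySem.Dict.mk ing).getD "name" "")) then s.add k
          else s) s)
      = (fun s ing => PySem.Set.update s (kws.filter
          (fun k => PySem.Str.isIn k (PySem.Str.lower ((PySem.Dict.mk ing).getD "name" ""))))) := by
    funext s ing
    exact pv_condFold_eq_update _ kws s
  have hlen : ∀ (s : PySem.Set String), PySem.Set.len s = (s.length : Int) := fun s => rfl
  rw [hempty, hstep, pv_sum_ones, hlen,
    pv_fold_length kws hk (fun ing k =>
      PySem.Str.isIn k (PySem.Str.lower ((PySem.Dict.mk ing).getD "name" ""))) ingredients]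
  refine congrArg _ (congrArg List.length (List.filter_congr ?_))
  intro k hkmem
  rw [pv_keyword_in_text k (hcond k hkmem).1 (hcond k hkmem).2, List.any_map]
  rfl

-- ===== VERDICT (by name: the statement is the Claim_ definition above) =====
set_option maxHeartbeats 1000000 in
theorem determine_seasonality_py_spec : Claim_equal_determine_seasonality_py := by
  intro recipe _
  unfold Spec_determine_seasonality_py
  simp only [determine_seasonality_py, determine_seasonality_py_alt]
  rw [pv_foldl_pair
    (fun b ing => List.foldl (fun s k =>
      if PySem.Str.isIn k (PySem.Str.lower ((PySem.Dict.mk ing).getD "name" "")) then s.add k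
      else s) b ["tomato", "basil", "corn", "zucchini", "berries"])
    (fun b ing => List.foldl (fun s k =>
      if PySem.Str.isIn k (PySem.Str.lower ((PySem.Dict.mk ing).getD "name" "")) then s.add k
      else s) b ["squash", "potato", "root", "hearty", "stew"])
    ((PySem.Dict.mk recipe).getD "extendedIngredients" [])
    (PySem.Set.empty, PySem.Set.empty)]
  rw [← pv_count_eq ["tomato", "basil", "corn", "zucchini", "berries"] (by decide) (by decide)
      ((PySem.Dict.mk recipe).getD "extendedIngredients" [])]
  rw [← pv_count_eq ["squash", "potato", "root", "hearty", "stew"] (by decide) (by decide)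
      ((PySem.Dict.mk recipe).getD "extendedIngredients" [])]
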